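-- pv_equiv track=rewrite | github.com/AlifSrSE/ProblemSolves | 1169B-pairs.py | alif
-- ===== SOURCE A (Python) =====
-- def alif(n, a, b):
--     m = len(a)
--
--     for v1 in [a[0], b[0]]:
--         index = None
--         for i in range(m):
--             if a[i] != v1 and b[i] != v1:
--                 index = i
--                 break
--
--         if index is None:
--             return True
--
--         for v2 in [a[index], b[index]]:
--             if all(a[i] == v1 or a[i] == v2 or b[i] == v1 or b[i] == v2 for i in range(m)):
--                 return True
--
--     return False
-- ===== SOURCE B (Python) =====
-- def alif(n, a, b):
--     m = len(a)
--     for v1 in [a[0], b[0]]: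
--         uncovered = [i for i in range(m) if a[i] != v1 and b[i] != v1]
--         if not uncovered:
--             return True
--         j = uncovered[0]
--         for v2 in [a[j], b[j]]:
--             if all(a[i] == v2 or b[i] == v2 for i in uncovered):
--                 return True
--     return False
-- ===== Notes on version B (the rewrite author's own statement) =====
-- stated objective: alternative
-- what changed: B materializes the list of indices not covered by v1 once, takes its head as the pivot, and verifies each v2 candidate only over that uncovered list, instead of A's break-search loop plus a full-range four-way disjunction scan; Pre_ excludes empty a and b shorter than a, where indexing b[i] raises unless and-short-circuiting happens to skip it, so whether A returns at all is an accident of evaluation order.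
-- outside the precondition, e.g. on alif(-1, [9, -1, 1, 4, 1, -3], [-1, 10, 5, 7]): A returns False, B raises IndexError; on alif(0, [1, 1], [1]): A returns True, B returns True
import Mathlib
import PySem

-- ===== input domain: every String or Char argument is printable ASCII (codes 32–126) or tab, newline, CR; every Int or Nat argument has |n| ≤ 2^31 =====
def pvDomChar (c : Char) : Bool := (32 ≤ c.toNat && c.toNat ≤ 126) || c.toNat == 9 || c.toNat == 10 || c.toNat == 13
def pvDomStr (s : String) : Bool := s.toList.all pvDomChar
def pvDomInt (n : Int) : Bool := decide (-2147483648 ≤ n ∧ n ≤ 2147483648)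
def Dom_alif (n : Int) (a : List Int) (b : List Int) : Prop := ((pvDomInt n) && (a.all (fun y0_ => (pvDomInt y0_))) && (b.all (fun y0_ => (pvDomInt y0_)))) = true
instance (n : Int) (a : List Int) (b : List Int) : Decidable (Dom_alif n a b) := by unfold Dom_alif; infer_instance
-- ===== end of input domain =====

-- B materializes the uncovered-index list once and verifies v2 only over it (alternative decomposition, same cost).
-- Pre_ excludes inputs where Python A raises IndexError: empty a/b or b shorter than a.


-- ===== PORT A =====
-- for i in range(m): if a[i]!=v1 and b[i]!=v1: index=i; break
def alifFindIndex (a b : List Int) (v1 : Int) : List Int → Option Int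
  | [] => none
  | i :: rest =>
    if (!(PySem.List.pyGetD a i 0 == v1) && !(PySem.List.pyGetD b i 0 == v1)) then some i
    else alifFindIndex a b v1 rest

-- the body of A's 'for v1 in [a[0], b[0]]' loop: True iff this v1 leads to 'return True'
def alifTryV1 (a b : List Int) (m : Int) (v1 : Int) : Bool :=
  match alifFindIndex a b v1 (PySem.List.pyRange 0 m 1) with
  | none => true
  | some idx =>
    [PySem.List.pyGetD a idx 0, PySem.List.pyGetD b idx 0].any (fun v2 =>
      (PySem.List.pyRange 0 m 1).all (fun i =>
        PySem.List.pyGetD a i 0 == v1 || PySem.List.pyGetD a i 0 == v2 ||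
        PySem.List.pyGetD b i 0 == v1 || PySem.List.pyGetD b i 0 == v2))

def alif (n : Int) (a : List Int) (b : List Int) : Bool :=
  let m : Int := (a.length : Int)
  [PySem.List.pyGetD a 0 0, PySem.List.pyGetD b 0 0].any (alifTryV1 a b m)

-- ===== PORT B =====
-- Source B's loop body: build 'uncovered' once, pivot on its head, test only v2 over it
def alifAltTryV1 (a b : List Int) (m : Int) (v1 : Int) : Bool :=
  let uncovered := (PySem.List.pyRange 0 m 1).filter
    (fun i => !(PySem.List.pyGetD a i 0 == v1) && !(PySem.List.pyGetD b i 0 == v1))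
  match uncovered with
  | [] => true
  | j :: _ =>
    [PySem.List.pyGetD a j 0, PySem.List.pyGetD b j 0].any (fun v2 =>
      uncovered.all (fun i =>
        PySem.List.pyGetD a i 0 == v2 || PySem.List.pyGetD b i 0 == v2))

def alif_alt (n : Int) (a : List Int) (b : List Int) : Bool :=
  let m : Int := (a.length : Int)
  [PySem.List.pyGetD a 0 0, PySem.List.pyGetD b 0 0].any (alifAltTryV1 a b m)

-- ===== PRECONDITION & SPEC =====
-- Pre_ excludes empty a and b shorter than a: there indexing b[i] raises IndexError unless and-short-circuiting
-- happens to skip it, so whether A (or B) returns at all is an accident of evaluation order.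
def Pre_alif (n : Int) (a : List Int) (b : List Int) : Prop :=
  a ≠ [] ∧ a.length ≤ b.length
instance (n : Int) (a : List Int) (b : List Int) : Decidable (Pre_alif n a b) := by
  unfold Pre_alif; infer_instance
def pvWitness_alif : Int × List Int × List Int := (2, [1, 2], [2, 3])

def Spec_alif (n : Int) (a : List Int) (b : List Int) (out : Bool) : Prop := out = alif_alt n a b
instance (n : Int) (a : List Int) (b : List Int) (out : Bool) : Decidable (Spec_alif n a b out) := by unfold Spec_alif; infer_instance

-- ===== CLAIM (what is proved, stated in full; the proofs are below) =====
def Claim_equal_alif : Prop := ∀ (n : Int) (a : List Int) (b : List Int), Dom_alif n a b → Pre_alif n a b → Spec_alif n a b (alif n a b)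

-- ===== LEMMAS AND PROOFS =====

-- A's break-search returns the head of the filtered index list
theorem alifFindIndex_eq_filter_head (a b : List Int) (v1 : Int) (L : List Int) :
    alifFindIndex a b v1 L =
      (L.filter (fun i => !(PySem.List.pyGetD a i 0 == v1) && !(PySem.List.pyGetD b i 0 == v1))).head? := by
  induction L with
  | nil => rfl
  | cons i rest ih =>
    simp only [alifFindIndex, List.filter_cons]
    by_cases h : (!(PySem.List.pyGetD a i 0 == v1) && !(PySem.List.pyGetD b i 0 == v1)) = true
    · simp [h]
    · simp [h, ih]

-- A's four-way scan over all indices equals B's two-way scan over the uncovered ones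
theorem alifAll_eq_filter_all (a b : List Int) (v1 v2 : Int) (L : List Int) :
    (L.all (fun i =>
        PySem.List.pyGetD a i 0 == v1 || PySem.List.pyGetD a i 0 == v2 ||
        PySem.List.pyGetD b i 0 == v1 || PySem.List.pyGetD b i 0 == v2)) =
    ((L.filter (fun i => !(PySem.List.pyGetD a i 0 == v1) && !(PySem.List.pyGetD b i 0 == v1))).all
      (fun i => PySem.List.pyGetD a i 0 == v2 || PySem.List.pyGetD b i 0 == v2)) := by
  induction L with
  | nil => rfl
  | cons i rest ih =>
    simp only [List.all_cons, List.filter_cons]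
    by_cases h : (!(PySem.List.pyGetD a i 0 == v1) && !(PySem.List.pyGetD b i 0 == v1)) = true
    · have h1 : (PySem.List.pyGetD a i 0 == v1) = false := by
        cases hx : (PySem.List.pyGetD a i 0 == v1) <;> simp [hx] at h ⊢
      have h2 : (PySem.List.pyGetD b i 0 == v1) = false := by
        cases hx : (PySem.List.pyGetD b i 0 == v1) <;> simp [hx] at h ⊢
      simp [h, h1, h2, ih]
    · have h' : (PySem.List.pyGetD a i 0 == v1) = true ∨ (PySem.List.pyGetD b i 0 == v1) = true := by
        cases hx : (PySem.List.pyGetD a i 0 == v1) <;>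
          cases hy : (PySem.List.pyGetD b i 0 == v1) <;> simp_all
      rcases h' with h' | h' <;> simp [h, h', ih]

theorem alifTryV1_eq (a b : List Int) (m : Int) (v1 : Int) :
    alifTryV1 a b m v1 = alifAltTryV1 a b m v1 := by
  unfold alifTryV1 alifAltTryV1
  rw [alifFindIndex_eq_filter_head]
  cases hf : (PySem.List.pyRange 0 m 1).filter
      (fun i => !(PySem.List.pyGetD a i 0 == v1) && !(PySem.List.pyGetD b i 0 == v1)) with
  | nil => simp [hf]
  | cons j rest =>
    simp only [hf, List.head?_cons]
    simp [List.any, alifAll_eq_filter_all a b v1 _ (PySem.List.pyRange 0 m 1), hf]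

-- ===== VERDICT (by name: the statement is the Claim_ definition above) =====
theorem alif_spec : Claim_equal_alif := by
  intro n a b _ _
  unfold Spec_alif alif alif_alt
  simp [alifTryV1_eq]
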